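-- pv_equiv track=rewrite | github.com/jackman993/ESG--report | company1.1-3.6/full_pptx_company.py | _split_into_paragraphs
-- ===== SOURCE A (Python) =====
-- from typing import List, Dict, Any, Optional, Tuple
--
-- def _split_into_paragraphs(text: str, count: int) -> List[str]:
--     words = text.split()
--     if count <= 1 or len(words) <= count:
--         return [text]
--     chunk_size = len(words) // count
--     paragraphs = []
--     for i in range(count - 1):
--         paragraphs.append(" ".join(words[i * chunk_size:(i + 1) * chunk_size]))
--     paragraphs.append(" ".join(words[(count - 1) * chunk_size:]))
--     return paragraphs
-- ===== SOURCE B (Python) =====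
-- from typing import List
--
-- def _split_into_paragraphs(text: str, count: int) -> List[str]:
--     words = text.split()
--     if count <= 1 or len(words) <= count:
--         return [text]
--     chunk_size = len(words) // count
--     paragraphs = []
--     buf = []
--     for w in words:
--         buf.append(w)
--         if len(buf) == chunk_size and len(paragraphs) < count - 1:
--             paragraphs.append(" ".join(buf))
--             buf = []
--     paragraphs.append(" ".join(buf))
--     return paragraphs
-- ===== Notes on version B (the rewrite author's own statement) =====
-- stated objective: alternative
-- what changed: Replaces the index-arithmetic slicing loop (range over paragraph indices, words[i*cs:(i+1)*cs]) by a single left-to-right pass over the words with a running buffer that is flushed each time it reaches chunk_size until count-1 paragraphs are out; the trailing buffer becomes the last paragraph.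
import Mathlib
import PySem

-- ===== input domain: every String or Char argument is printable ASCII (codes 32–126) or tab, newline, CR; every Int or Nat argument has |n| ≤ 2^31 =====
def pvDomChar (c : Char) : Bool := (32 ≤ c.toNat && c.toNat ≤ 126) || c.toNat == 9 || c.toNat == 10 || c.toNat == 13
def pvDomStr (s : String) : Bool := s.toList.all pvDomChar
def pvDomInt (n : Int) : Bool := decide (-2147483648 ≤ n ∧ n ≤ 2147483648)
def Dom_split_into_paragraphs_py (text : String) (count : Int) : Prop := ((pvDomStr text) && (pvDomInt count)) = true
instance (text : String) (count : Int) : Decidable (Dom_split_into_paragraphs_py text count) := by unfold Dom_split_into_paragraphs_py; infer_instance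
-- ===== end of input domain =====

-- B replaces A's index-arithmetic slicing loop by a single buffered pass over the words (alternative decomposition, same cost).


-- ===== PORT A =====
def split_into_paragraphs_py (text : String) (count : Int) : List String :=
  let words := PySem.Str.split₀ text
  if count ≤ 1 ∨ (words.length : Int) ≤ count then [text]
  else
    let chunk_size := PySem.Int.floordiv (words.length : Int) count
    let paragraphs := (PySem.List.pyRange 0 (count - 1) 1).foldl
      (fun ps i => ps ++ [PySem.Str.join " " (PySem.List.slice words (some (i * chunk_size)) (some ((i + 1) * chunk_size)))]) []
    paragraphs ++ [PySem.Str.join " " (PySem.List.slice words (some ((count - 1) * chunk_size)) none)]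

-- ===== PORT B =====
def split_into_paragraphs_py_alt (text : String) (count : Int) : List String :=
  let words := PySem.Str.split₀ text
  if count ≤ 1 ∨ (words.length : Int) ≤ count then [text]
  else
    let chunk_size := PySem.Int.floordiv (words.length : Int) count
    let st := words.foldl
      (fun (st : List String × List String) w =>
        let buf := st.2 ++ [w]
        if (buf.length : Int) = chunk_size ∧ (st.1.length : Int) < count - 1
        then (st.1 ++ [PySem.Str.join " " buf], [])
        else (st.1, buf)) ([], [])
    st.1 ++ [PySem.Str.join " " st.2]

-- ===== PRECONDITION & SPEC =====
def Spec_split_into_paragraphs_py (text : String) (count : Int) (out : List String) : Prop := out = split_into_paragraphs_py_alt text count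
instance (text : String) (count : Int) (out : List String) : Decidable (Spec_split_into_paragraphs_py text count out) := by unfold Spec_split_into_paragraphs_py; infer_instance

-- ===== CLAIM (what is proved, stated in full; the proofs are below) =====
def Claim_equal_split_into_paragraphs_py : Prop := ∀ (text : String) (count : Int), Dom_split_into_paragraphs_py text count → Spec_split_into_paragraphs_py text count (split_into_paragraphs_py text count)

-- ===== LEMMAS AND PROOFS =====

-- canonical chunking: k full chunks of size cs, then the remainder
def pvChunks : Nat → Nat → List String → List (List String)
  | 0, _, ws => [ws]
  | k+1, cs, ws => ws.take cs :: pvChunks k cs (ws.drop cs)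

-- B's loop body, in Nat form
def pvStep (cs L : Nat) (st : List String × List String) (w : String) : List String × List String :=
  let buf := st.2 ++ [w]
  if buf.length = cs ∧ st.1.length < L then (st.1 ++ [PySem.Str.join " " buf], []) else (st.1, buf)

theorem pv_foldl_append_eq_map {α β : Type} (l : List α) (acc : List β) (f : α → β) :
    l.foldl (fun ps i => ps ++ [f i]) acc = acc ++ l.map f := by
  induction l generalizing acc with
  | nil => simp
  | cons x xs ih => simp [List.foldl, ih]

theorem pvA_chunks (k cs : Nat) (ws : List String) :
    ((List.range k).map (fun i => (ws.drop (i*cs)).take cs)) ++ [ws.drop (k*cs)] = pvChunks k cs ws := by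
  induction k generalizing ws with
  | zero => simp [pvChunks]
  | succ k ih =>
    rw [List.range_succ_eq_map]
    simp only [List.map_cons, List.map_map]
    have h1 : ∀ i : Nat, ((i+1)*cs) = i*cs + cs := by intro i; ring
    have h2 : ∀ i : Nat, ws.drop (i*cs + cs) = (ws.drop cs).drop (i*cs) := by
      intro i; rw [List.drop_drop, Nat.add_comm]
    calc ((0*cs |> ws.drop).take cs) :: ((List.range k).map fun i => (ws.drop ((i+1)*cs)).take cs) ++ [ws.drop ((k+1)*cs)]
        = ws.take cs :: (((List.range k).map fun i => ((ws.drop cs).drop (i*cs)).take cs) ++ [(ws.drop cs).drop (k*cs)]) := by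
          simp only [h1, h2, Nat.zero_mul, List.drop_zero]
          simp
      _ = ws.take cs :: pvChunks k cs (ws.drop cs) := by rw [ih]
      _ = pvChunks (k+1) cs ws := rfl

theorem pvB_full (cs L : Nat) (ws acc buf : List String) (h : L ≤ acc.length) :
    ws.foldl (pvStep cs L) (acc, buf) = (acc, buf ++ ws) := by
  induction ws generalizing buf with
  | nil => simp
  | cons w ws ih =>
    have : pvStep cs L (acc, buf) w = (acc, buf ++ [w]) := by
      simp [pvStep]; omega
    simp only [List.foldl_cons, this, ih]
    simp

theorem pvB_fill (cs L : Nat) : ∀ (j : Nat) (ws acc buf : List String), 0 < j → buf.length + j = cs →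
    acc.length < L → j ≤ ws.length →
    ws.foldl (pvStep cs L) (acc, buf)
      = (ws.drop j).foldl (pvStep cs L) (acc ++ [PySem.Str.join " " (buf ++ ws.take j)], []) := by
  intro j
  induction j with
  | zero => intro _ _ _ h; omega
  | succ j ih =>
    intro ws acc buf _ hcs hL hlen
    match ws with
    | [] => simp at hlen
    | w :: ws =>
      cases Nat.eq_zero_or_pos j with
      | inl hj0 =>
        subst hj0
        have hstep : pvStep cs L (acc, buf) w = (acc ++ [PySem.Str.join " " (buf ++ [w])], []) := by
          simp only [pvStep]
          rw [if_pos]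
          constructor
          · simp; omega
          · exact hL
        simp only [List.foldl_cons, hstep, List.take_succ_cons, List.take_zero, List.drop_succ_cons,
          List.drop_zero]
      | inr hjpos =>
        have hstep : pvStep cs L (acc, buf) w = (acc, buf ++ [w]) := by
          simp only [pvStep]
          rw [if_neg]
          intro ⟨h1, _⟩
          simp at h1; omega
        simp only [List.foldl_cons, hstep, List.take_succ_cons, List.drop_succ_cons]
        rw [ih ws acc (buf ++ [w]) hjpos (by simp; omega) hL (by simpa using hlen)]
        simp

theorem pvB_main (cs L : Nat) (hcs : 0 < cs) : ∀ (k : Nat) (ws acc : List String),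
    acc.length + k = L → k * cs ≤ ws.length →
    (ws.foldl (pvStep cs L) (acc, [])).1 ++ [PySem.Str.join " " (ws.foldl (pvStep cs L) (acc, [])).2]
      = acc ++ (pvChunks k cs ws).map (PySem.Str.join " ") := by
  intro k
  induction k with
  | zero =>
    intro ws acc hlen _
    rw [pvB_full cs L ws acc [] (by omega)]
    simp [pvChunks]
  | succ k ih =>
    intro ws acc hlen hws
    have h1 : cs ≤ ws.length := by
      calc cs = 1 * cs := (Nat.one_mul cs).symm
        _ ≤ (k+1) * cs := Nat.mul_le_mul_right cs (by omega)
        _ ≤ ws.length := hws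
    rw [pvB_fill cs L cs ws acc [] hcs (by simp) (by omega) h1]
    have h2 : k * cs + cs ≤ ws.length := by
      have e : k * cs + cs = (k+1) * cs := by ring
      omega
    rw [ih (ws.drop cs) (acc ++ [PySem.Str.join " " ([] ++ ws.take cs)]) (by simp; omega)
      (by simp only [List.length_drop]; omega)]
    simp [pvChunks]

-- the Int-form loop body of the B port equals pvStep after casting
theorem pv_step_cast (cs L : Nat) :
    (fun (st : List String × List String) (w : String) =>
      if ((st.2 ++ [w]).length : Int) = (cs : Int) ∧ (st.1.length : Int) < (L : Int)
      then (st.1 ++ [PySem.Str.join " " (st.2 ++ [w])], ([] : List String))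
      else (st.1, st.2 ++ [w])) = pvStep cs L := by
  funext st w
  simp only [pvStep]
  by_cases h : (st.2 ++ [w]).length = cs ∧ st.1.length < L
  · rw [if_pos (by exact_mod_cast h), if_pos h]
  · rw [if_neg (by exact_mod_cast h), if_neg h]

-- ===== VERDICT (by name: the statement is the Claim_ definition above) =====
theorem split_into_paragraphs_py_spec : Claim_equal_split_into_paragraphs_py := by
  intro text count _
  unfold Spec_split_into_paragraphs_py split_into_paragraphs_py split_into_paragraphs_py_alt
  set ws := PySem.Str.split₀ text with hws
  by_cases hg : count ≤ 1 ∨ (ws.length : Int) ≤ count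
  · simp [hg]
  · simp only [if_neg hg]
    push Not at hg
    obtain ⟨h1, h2⟩ := hg
    obtain ⟨c, rfl⟩ : ∃ c : Nat, count = (c : Int) :=
      ⟨count.toNat, (Int.toNat_of_nonneg (by omega)).symm⟩
    have hc2 : 2 ≤ c := by exact_mod_cast h1
    set n := ws.length with hn
    have hnc : c < n := by exact_mod_cast h2
    set cs := n / c with hcs
    have hfd : PySem.Int.floordiv (n : Int) (c : Int) = (cs : Int) :=
      PySem.Int.floordiv_natCast n c
    have hcs1 : 1 ≤ cs := Nat.one_le_div_iff (by omega) |>.2 (by omega)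
    have hL : ((c : Int) - 1) = ((c - 1 : Nat) : Int) := by omega
    rw [hfd, hL]
    trans ((pvChunks (c-1) cs ws).map (PySem.Str.join " "))
    · -- A side equals the canonical chunks
      rw [PySem.List.pyRange_one, pv_foldl_append_eq_map, ← pvA_chunks (c-1) cs ws]
      simp only [List.nil_append, List.map_append, List.map_map, List.map_cons, List.map_nil]
      congr 1
      · have hcnt : ((((c-1:Nat):Int) - 0).toNat) = c - 1 := by omega
        rw [hcnt]
        apply List.map_congr_left
        intro k _
        simp only [Function.comp_apply]
        have e1 : ((0:Int) + (k:Int)) * (cs:Int) = ((k * cs : Nat) : Int) := by push_cast; ring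
        have e2 : ((0:Int) + (k:Int) + 1) * (cs:Int) = ((k * cs + cs : Nat) : Int) := by push_cast; ring
        rw [e1, e2, PySem.List.slice_natCast]
        congr 2
        omega
      · have e : (((c-1:Nat):Int) * (cs:Int)) = (((c-1)*cs : Nat) : Int) := by push_cast; ring
        rw [e, PySem.List.slice_from_natCast]
    · -- B side equals the canonical chunks
      rw [pv_step_cast cs (c-1)]
      rw [pvB_main cs (c-1) (by omega) (c-1) ws [] (by simp)
        (by
          have hmul : cs * c ≤ n := Nat.div_mul_le_self n c
          have h1 : (c-1) * cs ≤ cs * c := by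
            rw [Nat.mul_comm cs c]; exact Nat.mul_le_mul_right cs (by omega)
          exact le_trans h1 hmul)]
      simp
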